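-- pv_equiv track=rewrite | github.com/skorotkiewicz/mempalace | agent/agent.py | _messages_are_new_chat
-- ===== SOURCE A (Python) =====
-- from typing import Any, Dict, Iterable, Iterator, List, Optional
--
-- def _messages_are_new_chat(messages: List[Dict[str, Any]]) -> bool:
--     has_user = False
--     for message in messages:
--         role = message.get("role")
--         if role == "user":
--             has_user = True
--         elif role == "assistant":
--             return False
--     return has_user
-- ===== SOURCE B (Python) =====
-- from typing import Any, Dict, List
--
-- def _messages_are_new_chat(messages: List[Dict[str, Any]]) -> bool:
--     if any(m.get("role") == "assistant" for m in messages):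
--         return False
--     return any(m.get("role") == "user" for m in messages)
-- ===== Notes on version B (the rewrite author's own statement) =====
-- stated objective: idiomatic
-- what changed: Replaced the single stateful loop with a flag by two independent short-circuiting any() predicate passes (valid because A's early exit on assistant makes the result order-independent).
import Mathlib
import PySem

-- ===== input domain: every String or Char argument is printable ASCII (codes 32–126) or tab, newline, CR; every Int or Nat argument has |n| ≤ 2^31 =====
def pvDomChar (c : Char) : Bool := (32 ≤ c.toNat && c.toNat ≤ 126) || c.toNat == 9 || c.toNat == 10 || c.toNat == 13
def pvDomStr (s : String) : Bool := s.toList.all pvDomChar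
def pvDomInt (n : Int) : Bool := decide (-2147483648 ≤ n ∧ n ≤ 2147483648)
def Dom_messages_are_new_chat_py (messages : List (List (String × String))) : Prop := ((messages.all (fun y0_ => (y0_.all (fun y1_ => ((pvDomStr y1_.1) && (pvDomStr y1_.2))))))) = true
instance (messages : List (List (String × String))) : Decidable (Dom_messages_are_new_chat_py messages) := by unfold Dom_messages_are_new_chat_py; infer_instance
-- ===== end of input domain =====

-- B replaces A's single stateful flag loop with two independent short-circuiting any() passes (idiomatic; same cost).

-- ===== PORT A =====
-- the loop with the has_user flag and the early return on "assistant"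
def mancLoopA : List (List (String × String)) → Bool → Bool
  | [], hasUser => hasUser
  | m :: rest, hasUser =>
    let role := (PySem.Dict.mk m).get? "role"
    if role = some "user" then mancLoopA rest true
    else if role = some "assistant" then false
    else mancLoopA rest hasUser

def messages_are_new_chat_py (messages : List (List (String × String))) : Bool :=
  mancLoopA messages false

-- ===== PORT B =====
def messages_are_new_chat_py_alt (messages : List (List (String × String))) : Bool :=
  if messages.any (fun m => (PySem.Dict.mk m).get? "role" == some "assistant") then false
  else messages.any (fun m => (PySem.Dict.mk m).get? "role" == some "user")

-- ===== PRECONDITION & SPEC =====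
def Spec_messages_are_new_chat_py (messages : List (List (String × String))) (out : Bool) : Prop := out = messages_are_new_chat_py_alt messages
instance (messages : List (List (String × String))) (out : Bool) : Decidable (Spec_messages_are_new_chat_py messages out) := by unfold Spec_messages_are_new_chat_py; infer_instance

-- ===== CLAIM (what is proved, stated in full; the proofs are below) =====
def Claim_equal_messages_are_new_chat_py : Prop := ∀ (messages : List (List (String × String))), Dom_messages_are_new_chat_py messages → Spec_messages_are_new_chat_py messages (messages_are_new_chat_py messages)

-- ===== LEMMAS AND PROOFS =====
-- Invariant of A's loop: it returns false if any message has role "assistant",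
-- otherwise the flag OR-ed with "some message has role user".
theorem mancLoopA_eq (ms : List (List (String × String))) (hu : Bool) :
    mancLoopA ms hu =
      if ms.any (fun m => (PySem.Dict.mk m).get? "role" == some "assistant") then false
      else (hu || ms.any (fun m => (PySem.Dict.mk m).get? "role" == some "user")) := by
  induction ms generalizing hu with
  | nil => simp [mancLoopA]
  | cons m rest ih =>
    simp only [mancLoopA, List.any_cons]
    by_cases hU : (PySem.Dict.mk m).get? "role" = some "user"
    · simp [hU, ih]
    · by_cases hA : (PySem.Dict.mk m).get? "role" = some "assistant"
      · simp [hA]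
      · have hU' : ((PySem.Dict.mk m).get? "role" == some "user") = false := by
          simp only [beq_eq_false_iff_ne]; exact hU
        simp [hA, hU', ih]
        exact fun h _ => absurd h hU

-- ===== VERDICT (by name: the statement is the Claim_ definition above) =====
theorem messages_are_new_chat_py_spec : Claim_equal_messages_are_new_chat_py := by
  intro messages _
  unfold Spec_messages_are_new_chat_py messages_are_new_chat_py messages_are_new_chat_py_alt
  simp [mancLoopA_eq]
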